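-- pv_equiv track=rewrite | github.com/goodsky/goodsky-dev-wordgames | server/data/crossword/judge_commit.py | calculate_difficulty
-- ===== SOURCE A (Python) =====
-- def calculate_difficulty(clue_entries):
--     """
--     Calculate overall puzzle difficulty based on clue ratings.
--
--     Rules:
--     - EASY: Every answer has at least one EASY clue
--     - HARD: Every answer has at least one non-REJECT clue, but not all have EASY
--     - REJECT: Any answer has only REJECT clues (no clues or hardClues)
--     """
--     # Check if any answer has no clues at all (neither easy nor hard)
--     for entry in clue_entries:
--         easy_clues = entry.get("clues", [])
--         hard_clues = entry.get("hardClues", [])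
--         if not easy_clues and not hard_clues:
--             return "REJECT"
--
--     # Check if all answers have at least one EASY clue
--     all_have_easy = all(
--         len(entry.get("clues", [])) > 0
--         for entry in clue_entries
--     )
--
--     if all_have_easy:
--         return "EASY"
--     else:
--         return "HARD"
-- ===== SOURCE B (Python) =====
-- def calculate_difficulty(clue_entries):
--     # Single fused pass: reject immediately on a clue-less entry,
--     # otherwise track whether every entry has an easy clue.
--     all_have_easy = True
--     for entry in clue_entries:
--         easy = entry.get("clues", [])
--         hard = entry.get("hardClues", [])
--         if not easy and not hard:
--             return "REJECT"
--         if not easy: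
--             all_have_easy = False
--     return "EASY" if all_have_easy else "HARD"
-- ===== Notes on version B (the rewrite author's own statement) =====
-- stated objective: simpler
-- what changed: B replaces A's two full traversals (an early-return reject scan plus a separate all() generator pass) by one fused loop maintaining an all_have_easy flag.
import Mathlib
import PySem

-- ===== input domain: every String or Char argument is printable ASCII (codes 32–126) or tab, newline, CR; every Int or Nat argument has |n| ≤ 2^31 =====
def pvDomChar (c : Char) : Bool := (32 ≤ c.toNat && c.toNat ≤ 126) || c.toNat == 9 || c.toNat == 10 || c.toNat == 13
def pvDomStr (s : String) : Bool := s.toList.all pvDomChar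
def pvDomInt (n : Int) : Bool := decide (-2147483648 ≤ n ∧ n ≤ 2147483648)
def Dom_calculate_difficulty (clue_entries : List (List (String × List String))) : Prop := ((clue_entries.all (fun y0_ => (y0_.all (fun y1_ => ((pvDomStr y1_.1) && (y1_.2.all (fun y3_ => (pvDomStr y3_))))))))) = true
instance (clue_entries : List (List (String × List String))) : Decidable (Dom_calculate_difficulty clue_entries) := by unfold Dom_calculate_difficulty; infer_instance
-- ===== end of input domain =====

-- B fuses A's two sequential passes into one loop with an all_have_easy flag (same behaviour, single traversal).


-- ===== PORT A =====
-- first loop of A: early 'return "REJECT"' on an entry with neither clue list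
def cdA_rejectLoop : List (List (String × List String)) → Bool
  | [] => false
  | e :: rest =>
    if (PySem.Dict.getD (PySem.Dict.mk e) "clues" []).isEmpty && (PySem.Dict.getD (PySem.Dict.mk e) "hardClues" []).isEmpty then true
    else cdA_rejectLoop rest

def calculate_difficulty (clue_entries : List (List (String × List String))) : String :=
  if cdA_rejectLoop clue_entries then "REJECT"
  else if clue_entries.all (fun e => decide (0 < (PySem.Dict.getD (PySem.Dict.mk e) "clues" []).length)) then "EASY"
  else "HARD"

-- ===== PORT B =====
-- B: one fused pass carrying the all_have_easy flag
def cdB_loop : List (List (String × List String)) → Bool → String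
  | [], allEasy => if allEasy then "EASY" else "HARD"
  | e :: rest, allEasy =>
    let easy := PySem.Dict.getD (PySem.Dict.mk e) "clues" []
    let hard := PySem.Dict.getD (PySem.Dict.mk e) "hardClues" []
    if easy.isEmpty && hard.isEmpty then "REJECT"
    else if easy.isEmpty then cdB_loop rest false
    else cdB_loop rest allEasy

def calculate_difficulty_alt (clue_entries : List (List (String × List String))) : String :=
  cdB_loop clue_entries true

-- ===== PRECONDITION & SPEC =====
def Spec_calculate_difficulty (clue_entries : List (List (String × List String))) (out : String) : Prop := out = calculate_difficulty_alt clue_entries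
instance (clue_entries : List (List (String × List String))) (out : String) : Decidable (Spec_calculate_difficulty clue_entries out) := by unfold Spec_calculate_difficulty; infer_instance

-- ===== CLAIM (what is proved, stated in full; the proofs are below) =====
def Claim_equal_calculate_difficulty : Prop := ∀ (clue_entries : List (List (String × List String))), Dom_calculate_difficulty clue_entries → Spec_calculate_difficulty clue_entries (calculate_difficulty clue_entries)

-- ===== LEMMAS AND PROOFS =====

-- ===== VERDICT (by name: the statement is the Claim_ definition above) =====
lemma cdB_loop_char (ces : List (List (String × List String))) :
    ∀ b : Bool, cdB_loop ces b =
      if cdA_rejectLoop ces then "REJECT"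
      else if b && ces.all (fun e => decide (0 < (PySem.Dict.getD (PySem.Dict.mk e) "clues" []).length)) then "EASY"
      else "HARD" := by
  induction ces with
  | nil => intro b; simp [cdB_loop, cdA_rejectLoop]
  | cons e rest ih =>
    intro b
    simp only [cdB_loop, cdA_rejectLoop, List.all_cons]
    by_cases h1 : (PySem.Dict.getD (PySem.Dict.mk e) "clues" []).isEmpty
    · by_cases h2 : (PySem.Dict.getD (PySem.Dict.mk e) "hardClues" []).isEmpty
      · simp [h1, h2]
      · have hlen : ¬ (0 < (PySem.Dict.getD (PySem.Dict.mk e) "clues" []).length) := by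
          simp [List.isEmpty_iff] at h1; simp [h1]
        simp [h1, h2, ih, hlen]
    · have hlen : 0 < (PySem.Dict.getD (PySem.Dict.mk e) "clues" []).length := by
        cases hx : PySem.Dict.getD (PySem.Dict.mk e) "clues" [] with
        | nil => simp [hx] at h1
        | cons a l => simp
      simp [h1, ih, hlen]

theorem calculate_difficulty_spec : Claim_equal_calculate_difficulty := by
  intro ces _
  unfold Spec_calculate_difficulty calculate_difficulty calculate_difficulty_alt
  rw [cdB_loop_char]
  simp
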